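-- pv_equiv track=rewrite | github.com/steveweiss1/adventofcode | python/advent2024/q18.py | part2
-- ===== SOURCE A (Python) =====
-- from collections import defaultdict
-- import heapq
--
-- def dijkstra(start, end, blocks):
--     # dijkstra time
--     priority_queue = []
--     heapq.heappush(priority_queue, (0, start))
--
--     # Dictionary to store the shortest distance to each node
--     shortest_distances = defaultdict(lambda: float('inf'))
--     shortest_distances[start] = 0
--
--     # Dictionary to store the shortest path tree
--     nodes_in_paths = {start}
--
--     while priority_queue:
--         current_distance, current_node = heapq.heappop(priority_queue)
--
--         # Skip if a shorter path to the node has already been found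
--         # if current_distance > shortest_distances[current_node]:
--         #    continue
--
--         # Explore neighbors
--         for neighbor in [(current_node[0], current_node[1] + 1), (current_node[0], current_node[1] - 1),
--                          (current_node[0] + 1, current_node[1]), (current_node[0] - 1, current_node[1])]:
--             if neighbor in blocks:
--                 continue
--
--             if neighbor[0] not in range(start[0], end[0] + 1) or neighbor[1] not in range(start[1], end[1] + 1):
--                 continue
--
--             distance = current_distance + 1
--
--             # If a shorter path is found
--             if distance < shortest_distances[neighbor]:
--                 shortest_distances[neighbor] = distance
--                 heapq.heappush(priority_queue, (distance, neighbor))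
--
--     return shortest_distances[end]
--
-- def part2(pairs, max_x, max_y):
--     blocks = set()
--     for p in pairs:
--         blocks.add(p)
--         d = dijkstra((0, 0), (max_x, max_y), blocks)
--         if d == float('inf'):
--             return p
--     return
-- ===== SOURCE B (Python) =====
-- def part2(pairs, max_x, max_y):
--     # binary search on the number of blocks (reachability is monotone in the block set),
--     # with a plain flood fill instead of Dijkstra for each connectivity test
--     def connected(k):
--         blocked = set(pairs[:k])
--         seen = {(0, 0)}
--         todo = [(0, 0)]
--         while todo:
--             x, y = todo.pop()
--             for nb in ((x, y + 1), (x, y - 1), (x + 1, y), (x - 1, y)):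
--                 if nb not in seen and nb not in blocked \
--                         and 0 <= nb[0] <= max_x and 0 <= nb[1] <= max_y:
--                     seen.add(nb)
--                     todo.append(nb)
--         return (max_x, max_y) in seen
--     n = len(pairs)
--     if n == 0 or connected(n):
--         return None
--     lo, hi = 0, n
--     # invariant: not connected(hi); connected(lo) or lo == 0
--     while hi - lo > 1:
--         mid = (lo + hi) // 2
--         if connected(mid):
--             lo = mid
--         else:
--             hi = mid
--     return pairs[hi - 1]
-- ===== Notes on version B (the rewrite author's own statement) =====
-- stated objective: faster
-- what changed: A reruns Dijkstra (heap + distance map) on the whole grid after every single added block; B binary-searches on the number of blocks (reachability is monotone in the block set) and tests each candidate prefix with a plain flood fill over a visited set, so only O(log n) connectivity probes are run instead of n Dijkstra runs.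
import Mathlib
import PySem

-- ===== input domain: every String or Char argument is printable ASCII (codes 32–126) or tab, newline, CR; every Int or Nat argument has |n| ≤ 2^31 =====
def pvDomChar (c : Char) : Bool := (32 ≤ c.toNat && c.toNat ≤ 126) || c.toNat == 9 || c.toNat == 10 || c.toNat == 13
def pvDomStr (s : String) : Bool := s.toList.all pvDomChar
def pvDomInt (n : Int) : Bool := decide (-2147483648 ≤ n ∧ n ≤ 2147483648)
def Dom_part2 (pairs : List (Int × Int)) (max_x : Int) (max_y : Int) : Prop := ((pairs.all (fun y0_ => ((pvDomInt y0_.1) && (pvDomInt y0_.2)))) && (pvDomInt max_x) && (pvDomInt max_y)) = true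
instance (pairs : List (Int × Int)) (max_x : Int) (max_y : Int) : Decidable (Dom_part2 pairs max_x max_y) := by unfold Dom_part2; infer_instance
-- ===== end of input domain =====

-- B replaces A's per-prefix Dijkstra scan by a binary search over the number of blocks
-- (reachability is monotone in the block set) with a plain flood fill per probe.

-- ===== PORT A =====
-- Python tuple order on heap entries (dist, (x, y)); equal entries are identical tuples,
-- so heapq.heappop is modelled exactly as: remove the minimum entry by tuple order.
def tripLt (a b : Int × Int × Int) : Bool :=
  a.1 < b.1 || (a.1 == b.1 && (a.2.1 < b.2.1 || (a.2.1 == b.2.1 && a.2.2 < b.2.2)))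

def pqMin (e : Int × Int × Int) (q : List (Int × Int × Int)) : Int × Int × Int :=
  q.foldl (fun m x => if tripLt x m then x else m) e

-- body of A's `for neighbor in [...]` loop: the (queue, distances) state after one neighbour
def relax (blocks : List (Int × Int)) (sx sy ex ey : Int) (cd : Int)
    (st : List (Int × Int × Int) × PySem.Dict (Int × Int) Int) (nb : Int × Int) :
    List (Int × Int × Int) × PySem.Dict (Int × Int) Int :=
  if nb ∈ blocks then st
  else if ¬ (sx ≤ nb.1 ∧ nb.1 ≤ ex ∧ sy ≤ nb.2 ∧ nb.2 ≤ ey) then st  -- `in range(start, end+1)`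
  else
    let distance := cd + 1
    -- defaultdict(inf): a missing key compares as infinity, so `distance < dist[nb]` is true
    match st.2.get? nb with
    | none => ((nb.1, nb.2), distance) |> fun _ => (st.1 ++ [(distance, nb)], st.2.insert nb distance)
    | some dv => if distance < dv then (st.1 ++ [(distance, nb)], st.2.insert nb distance) else st

-- A's `while priority_queue:` loop (fuel only makes it total; it is never exhausted)
def dijLoop (blocks : List (Int × Int)) (sx sy ex ey : Int) :
    Nat → List (Int × Int × Int) → PySem.Dict (Int × Int) Int → PySem.Dict (Int × Int) Int
  | 0, _, dist => dist
  | _ + 1, [], dist => dist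
  | fuel + 1, e :: q, dist =>
    let m := pqMin e q
    let q' := (e :: q).erase m
    let x := m.2.1
    let y := m.2.2
    let st := [(x, y + 1), (x, y - 1), (x + 1, y), (x - 1, y)].foldl
      (relax blocks sx sy ex ey m.1) (q', dist)
    dijLoop blocks sx sy ex ey fuel st.1 st.2

-- `some d` is a finite shortest distance, `none` is float('inf')
def dijkstra (start : Int × Int) (yend : Int × Int) (blocks : List (Int × Int)) : Option Int :=
  let fuel := 2 * ((yend.1 - start.1 + 1).toNat * (yend.2 - start.2 + 1).toNat) + 2
  (dijLoop blocks start.1 start.2 yend.1 yend.2 fuel [(0, start)]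
      ((PySem.Dict.empty).insert start 0)).get? yend

def part2Go (max_x max_y : Int) : PySem.Set (Int × Int) → List (Int × Int) → Option (Int × Int)
  | _, [] => none
  | blocks, p :: rest =>
    let blocks' := PySem.Set.add blocks p
    if dijkstra (0, 0) (max_x, max_y) blocks' = none then some p
    else part2Go max_x max_y blocks' rest

def part2 (pairs : List (Int × Int)) (max_x : Int) (max_y : Int) : Option (Int × Int) :=
  part2Go max_x max_y PySem.Set.empty pairs

-- ===== PORT B =====
-- body of B's `for nb in ...` loop inside the flood fill
def bfsVisit (blocked : List (Int × Int)) (max_x max_y : Int)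
    (st : PySem.Set (Int × Int) × List (Int × Int)) (nb : Int × Int) :
    PySem.Set (Int × Int) × List (Int × Int) :=
  if nb ∉ st.1 ∧ nb ∉ blocked ∧ 0 ≤ nb.1 ∧ nb.1 ≤ max_x ∧ 0 ≤ nb.2 ∧ nb.2 ≤ max_y then
    (PySem.Set.add st.1 nb, st.2 ++ [nb])
  else st

-- B's `while todo:` flood-fill loop; `todo.pop()` takes the last element
def bfsLoop (blocked : List (Int × Int)) (max_x max_y : Int) :
    Nat → PySem.Set (Int × Int) → List (Int × Int) → PySem.Set (Int × Int)
  | 0, seen, _ => seen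
  | _ + 1, seen, [] => seen
  | fuel + 1, seen, t :: ts =>
    let cur := (t :: ts).getLast (by simp)
    let todo' := (t :: ts).dropLast
    let x := cur.1
    let y := cur.2
    let st := [(x, y + 1), (x, y - 1), (x + 1, y), (x - 1, y)].foldl
      (bfsVisit blocked max_x max_y) (seen, todo')
    bfsLoop blocked max_x max_y fuel st.1 st.2

def connectedB (pairs : List (Int × Int)) (k : Int) (max_x max_y : Int) : Bool :=
  let blocked := PySem.Set.ofList (PySem.List.slice pairs none (some k))
  let fuel := 2 * ((max_x + 1).toNat * (max_y + 1).toNat) + 2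
  let seen := bfsLoop blocked max_x max_y fuel (PySem.Set.ofList [((0 : Int), (0 : Int))])
      [((0 : Int), (0 : Int))]
  decide ((max_x, max_y) ∈ seen)

-- B's `while hi - lo > 1:` binary search (fuel only makes it total)
def bsLoop (pairs : List (Int × Int)) (max_x max_y : Int) :
    Nat → Int → Int → Option (Int × Int)
  | 0, _, hi => PySem.List.pyGet? pairs (hi - 1)
  | fuel + 1, lo, hi =>
    if hi - lo > 1 then
      let mid := PySem.Int.floordiv (lo + hi) 2
      if connectedB pairs mid max_x max_y then bsLoop pairs max_x max_y fuel mid hi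
      else bsLoop pairs max_x max_y fuel lo mid
    else PySem.List.pyGet? pairs (hi - 1)

def part2_alt (pairs : List (Int × Int)) (max_x : Int) (max_y : Int) : Option (Int × Int) :=
  let n : Int := pairs.length
  if n = 0 ∨ connectedB pairs n max_x max_y then none
  else bsLoop pairs max_x max_y (pairs.length + 1) 0 n

-- ===== PRECONDITION & SPEC =====
def Spec_part2 (pairs : List (Int × Int)) (max_x : Int) (max_y : Int) (out : Option (Int × Int)) : Prop := out = part2_alt pairs max_x max_y
instance (pairs : List (Int × Int)) (max_x : Int) (max_y : Int) (out : Option (Int × Int)) : Decidable (Spec_part2 pairs max_x max_y out) := by unfold Spec_part2; infer_instance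

-- ===== CLAIM (what is proved, stated in full; the proofs are below) =====
def Claim_equal_part2 : Prop := ∀ (pairs : List (Int × Int)) (max_x : Int) (max_y : Int), Dom_part2 pairs max_x max_y → Spec_part2 pairs max_x max_y (part2 pairs max_x max_y)

-- ===== LEMMAS AND PROOFS =====

-- the common ground: cells reachable from (0,0) through unblocked in-bounds cells
def Good (blocks : List (Int × Int)) (mx my : Int) (v : Int × Int) : Prop :=
  v ∉ blocks ∧ 0 ≤ v.1 ∧ v.1 ≤ mx ∧ 0 ≤ v.2 ∧ v.2 ≤ my

def Adj (u v : Int × Int) : Prop :=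
  v = (u.1, u.2 + 1) ∨ v = (u.1, u.2 - 1) ∨ v = (u.1 + 1, u.2) ∨ v = (u.1 - 1, u.2)

inductive Reach (blocks : List (Int × Int)) (mx my : Int) : Int × Int → Prop
  | start : Reach blocks mx my (0, 0)
  | step {u v} : Reach blocks mx my u → Adj u v → Good blocks mx my v → Reach blocks mx my v

lemma Reach_anti {b1 b2 : List (Int × Int)} {mx my : Int} {v : Int × Int}
    (hsub : ∀ z, z ∈ b1 → z ∈ b2) (h : Reach b2 mx my v) : Reach b1 mx my v := by
  induction h with
  | start => exact Reach.start
  | step _ hadj hgood ih =>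
    exact Reach.step ih hadj ⟨fun hm => hgood.1 (hsub _ hm), hgood.2.1, hgood.2.2.1, hgood.2.2.2.1, hgood.2.2.2.2⟩

lemma Reach_congr {b1 b2 : List (Int × Int)} {mx my : Int} {v : Int × Int}
    (hmem : ∀ z, z ∈ b1 ↔ z ∈ b2) : (Reach b1 mx my v ↔ Reach b2 mx my v) :=
  ⟨Reach_anti (fun z h => (hmem z).2 h), Reach_anti (fun z h => (hmem z).1 h)⟩

def ClosedIn (blocked : List (Int × Int)) (mx my : Int) (S : List (Int × Int)) (v : Int × Int) : Prop :=
  ∀ w, Adj v w → Good blocked mx my w → w ∈ S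

-- a nodup list of cells that are (0,0) or in bounds has at most box+1 elements
lemma length_le_box {mx my : Int} {l : List (Int × Int)} (hnd : l.Nodup)
    (h : ∀ v ∈ l, v = ((0 : Int), (0 : Int)) ∨ (0 ≤ v.1 ∧ v.1 ≤ mx ∧ 0 ≤ v.2 ∧ v.2 ≤ my)) :
    l.length ≤ (mx + 1).toNat * (my + 1).toNat + 1 := by
  classical
  have hsub : l.toFinset ⊆ insert ((0 : Int), (0 : Int)) (Finset.Icc 0 mx ×ˢ Finset.Icc 0 my) := by
    intro v hv
    rcases h v (List.mem_toFinset.1 hv) with rfl | hb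
    · exact Finset.mem_insert_self _ _
    · exact Finset.mem_insert_of_mem (by
        rw [Finset.mem_product]
        constructor <;> rw [Finset.mem_Icc] <;> omega)
  have hcard := Finset.card_le_card hsub
  rw [List.toFinset_card_of_nodup hnd] at hcard
  have h2 : (insert ((0 : Int), (0 : Int)) (Finset.Icc 0 mx ×ˢ Finset.Icc 0 my)).card ≤
      (Finset.Icc (0:Int) mx ×ˢ Finset.Icc (0:Int) my).card + 1 := Finset.card_insert_le _ _
  rw [Finset.card_product, Int.card_Icc, Int.card_Icc] at h2
  simp only [Int.sub_zero] at h2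
  omega

lemma tripLt_fst_le {a b : Int × Int × Int} (h : tripLt a b = true) : a.1 ≤ b.1 := by
  simp [tripLt] at h; rcases h with h | h <;> omega

lemma not_tripLt_fst_le {a b : Int × Int × Int} (h : tripLt a b = false) : b.1 ≤ a.1 := by
  by_contra hc
  simp [tripLt] at h
  omega

lemma pqMin_mem (e : Int × Int × Int) (q : List (Int × Int × Int)) : pqMin e q ∈ e :: q := by
  induction q generalizing e with
  | nil => simp [pqMin]
  | cons a q ih =>
    have hmin : pqMin e (a :: q) = pqMin (if tripLt a e then a else e) q := by
      simp [pqMin]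
    have h := ih (if tripLt a e then a else e)
    rw [hmin]
    rcases List.mem_cons.1 h with h | h
    · rw [h]; split
      · simp
      · simp
    · simp [h]

lemma pqMin_fst_le (e : Int × Int × Int) (q : List (Int × Int × Int)) :
    ∀ x ∈ e :: q, (pqMin e q).1 ≤ x.1 := by
  induction q generalizing e with
  | nil => simp [pqMin]
  | cons a q ih =>
    intro x hx
    have hmin : pqMin e (a :: q) = pqMin (if tripLt a e then a else e) q := by
      simp [pqMin]
    have hle : (pqMin (if tripLt a e then a else e) q).1 ≤ (if tripLt a e then a else e).1 :=
      ih _ _ (by simp)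
    have hite_e : (if tripLt a e then a else e).1 ≤ e.1 := by
      rcases hb : tripLt a e with _ | _
      · simp
      · rw [if_pos rfl]; exact tripLt_fst_le hb
    have hite_a : (if tripLt a e then a else e).1 ≤ a.1 := by
      rcases hb : tripLt a e with _ | _
      · simp only [Bool.false_eq_true, if_false]; exact not_tripLt_fst_le hb
      · simp
    rcases List.mem_cons.1 hx with rfl | hx
    · rw [hmin]; exact le_trans hle hite_e
    · rcases List.mem_cons.1 hx with rfl | hx
      · rw [hmin]; exact le_trans hle hite_a
      · rw [hmin]; exact ih _ x (List.mem_cons_of_mem _ hx)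

-- ===== A-side invariant =====

def AInv (blocks : List (Int × Int)) (mx my : Int)
    (q : List (Int × Int × Int)) (dist : PySem.Dict (Int × Int) Int) (last : Int) : Prop :=
  (∀ e ∈ q, last ≤ e.1 ∧ e.2 ∈ dist.keys) ∧
  (∀ v ∈ dist.keys, v = ((0 : Int), (0 : Int)) ∨
    (Good blocks mx my v ∧ ∃ dv, dist.get? v = some dv ∧ dv ≤ last + 1)) ∧
  dist.get? ((0 : Int), (0 : Int)) = some 0 ∧ (-1 ≤ last) ∧
  (∀ v ∈ dist.keys, Reach blocks mx my v) ∧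
  (∀ v ∈ dist.keys, ClosedIn blocks mx my dist.keys v ∨ ∃ e ∈ q, e.2 = v) ∧
  dist.keys.Nodup

def phiA (mx my : Int) (q : List (Int × Int × Int)) (dist : PySem.Dict (Int × Int) Int) : Int :=
  2 * ((mx + 1).toNat * (my + 1).toNat + 1) + q.length - 2 * dist.keys.length

-- mid-iteration invariant: the popped node may still be half-expanded
def AMid (blocks : List (Int × Int)) (mx my : Int) (d₀ : Int) (cur : Int × Int)
    (st : List (Int × Int × Int) × PySem.Dict (Int × Int) Int) : Prop :=
  (∀ e ∈ st.1, d₀ ≤ e.1 ∧ e.2 ∈ st.2.keys) ∧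
  (∀ v ∈ st.2.keys, v = ((0 : Int), (0 : Int)) ∨
    (Good blocks mx my v ∧ ∃ dv, st.2.get? v = some dv ∧ dv ≤ d₀ + 1)) ∧
  st.2.get? ((0 : Int), (0 : Int)) = some 0 ∧ (-1 ≤ d₀) ∧
  (∀ v ∈ st.2.keys, Reach blocks mx my v) ∧
  (∀ v ∈ st.2.keys, ClosedIn blocks mx my st.2.keys v ∨ v = cur ∨ ∃ e ∈ st.1, e.2 = v) ∧
  st.2.keys.Nodup

lemma relax_step (blocks : List (Int × Int)) (mx my : Int) (d₀ : Int) (cur nb : Int × Int)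
    (st : List (Int × Int × Int) × PySem.Dict (Int × Int) Int)
    (hmid : AMid blocks mx my d₀ cur st)
    (hre : Good blocks mx my nb → Reach blocks mx my nb) :
    AMid blocks mx my d₀ cur (relax blocks 0 0 mx my d₀ st nb) ∧
    (∀ v ∈ st.2.keys, v ∈ (relax blocks 0 0 mx my d₀ st nb).2.keys) ∧
    (Good blocks mx my nb → nb ∈ (relax blocks 0 0 mx my d₀ st nb).2.keys) ∧
    phiA mx my (relax blocks 0 0 mx my d₀ st nb).1 (relax blocks 0 0 mx my d₀ st nb).2 ≤
      phiA mx my st.1 st.2 := by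
  obtain ⟨h1, h2, h3, h4, h5, h6, h7⟩ := hmid
  unfold relax
  split
  · -- nb is a block
    rename_i hblk
    exact ⟨⟨h1, h2, h3, h4, h5, h6, h7⟩, fun v hv => hv,
      fun hg => absurd hblk hg.1, le_refl _⟩
  · rename_i hblk
    split
    · -- nb out of bounds
      rename_i hob
      exact ⟨⟨h1, h2, h3, h4, h5, h6, h7⟩, fun v hv => hv,
        fun hg => absurd ⟨hg.2.1, hg.2.2.1, hg.2.2.2.1, hg.2.2.2.2⟩ hob, le_refl _⟩
    · rename_i hob
      rw [not_not] at hob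
      have hgood : Good blocks mx my nb := ⟨hblk, hob.1, hob.2.1, hob.2.2.1, hob.2.2.2⟩
      cases hget : st.2.get? nb with
      | none =>
        -- fresh node: store and push
        have hnk : nb ∉ st.2.keys := (PySem.Dict.get?_eq_none_iff_not_mem_keys _ _).1 hget
        have hz : ((0 : Int), (0 : Int)) ∈ st.2.keys := by
          by_contra hc
          have hn := (PySem.Dict.get?_eq_none_iff_not_mem_keys _ _).2 hc
          rw [h3] at hn
          exact Option.some_ne_none _ hn
        have hnz : nb ≠ ((0 : Int), (0 : Int)) := fun he => hnk (he ▸ hz)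
        have hcont : st.2.contains nb = false := by
          rw [PySem.Dict.contains_eq_isSome_get?, hget]; rfl
        have hkeys : (st.2.insert nb (d₀ + 1)).keys = st.2.keys ++ [nb] :=
          PySem.Dict.keys_insert_of_not_contains _ _ hcont
        simp only []
        refine ⟨⟨?_, ?_, ?_, h4, ?_, ?_, ?_⟩, ?_, ?_, ?_⟩
        · intro e he
          rcases List.mem_append.1 he with he | he
          · exact ⟨(h1 e he).1, by rw [hkeys]; exact List.mem_append_left _ (h1 e he).2⟩
          · rw [List.mem_singleton.1 he]
            exact ⟨by omega, by rw [hkeys]; exact List.mem_append_right _ (by simp)⟩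
        · intro v hv
          rw [hkeys] at hv
          rcases List.mem_append.1 hv with hv | hv
          · rcases h2 v hv with hv0 | ⟨hgv, dv, hdv, hle⟩
            · exact Or.inl hv0
            · refine Or.inr ⟨hgv, dv, ?_, hle⟩
              rw [PySem.Dict.get?_insert_of_ne _ _ (fun he => hnk (by rw [← he]; exact hv))]
              exact hdv
          · rw [List.mem_singleton.1 hv]
            exact Or.inr ⟨hgood, d₀ + 1, PySem.Dict.get?_insert_self _ _ _, le_refl _⟩
        · rw [PySem.Dict.get?_insert_of_ne _ _ (Ne.symm hnz)]
          exact h3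
        · intro v hv
          rw [hkeys] at hv
          rcases List.mem_append.1 hv with hv | hv
          · exact h5 v hv
          · rw [List.mem_singleton.1 hv]; exact hre hgood
        · intro v hv
          rw [hkeys] at hv
          rcases List.mem_append.1 hv with hv | hv
          · rcases h6 v hv with hcl | hcv | ⟨e, he, hev⟩
            · left; intro w haw hgw
              rw [hkeys]; exact List.mem_append_left _ (hcl w haw hgw)
            · exact Or.inr (Or.inl hcv)
            · exact Or.inr (Or.inr ⟨e, List.mem_append_left _ he, hev⟩)
          · rw [List.mem_singleton.1 hv]
            exact Or.inr (Or.inr ⟨(d₀ + 1, nb), List.mem_append_right _ (by simp), rfl⟩)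
        · rw [hkeys]
          refine List.Nodup.append h7 (List.nodup_singleton _) ?_
          intro x hx hy
          rw [List.mem_singleton] at hy
          exact hnk (hy ▸ hx)
        · intro v hv; rw [hkeys]; exact List.mem_append_left _ hv
        · intro _; rw [hkeys]; exact List.mem_append_right _ (by simp)
        · simp only [phiA, hkeys, List.length_append, List.length_singleton]
          push_cast; omega
      | some dv =>
        -- nb already has a distance; the improvement test can never succeed
        have hmem : nb ∈ st.2.keys := by
          by_contra hc
          have hn := (PySem.Dict.get?_eq_none_iff_not_mem_keys _ _).2 hc
          rw [hget] at hn
          exact Option.some_ne_none _ hn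
        have hnlt : ¬ (d₀ + 1 < dv) := by
          rcases h2 nb hmem with hv0 | ⟨_, dv', hdv', hle⟩
          · rw [hv0] at hget
            rw [h3] at hget
            have : dv = 0 := by injection hget; omega
            omega
          · rw [hget] at hdv'
            have : dv' = dv := by injection hdv'; omega
            omega
        simp only [if_neg hnlt]
        exact ⟨⟨h1, h2, h3, h4, h5, h6, h7⟩, fun v hv => hv, fun _ => hmem, le_refl _⟩

lemma dij_run (blocks : List (Int × Int)) (mx my : Int) :
    ∀ (fuel : Nat) (q : List (Int × Int × Int)) (dist : PySem.Dict (Int × Int) Int) (last : Int),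
      AInv blocks mx my q dist last → phiA mx my q dist ≤ fuel →
      (∀ v ∈ dist.keys, v ∈ (dijLoop blocks 0 0 mx my fuel q dist).keys) ∧
      (∀ v ∈ (dijLoop blocks 0 0 mx my fuel q dist).keys, Reach blocks mx my v) ∧
      (∀ v ∈ (dijLoop blocks 0 0 mx my fuel q dist).keys,
        ClosedIn blocks mx my (dijLoop blocks 0 0 mx my fuel q dist).keys v) := by
  intro fuel
  induction fuel with
  | zero =>
    intro q dist last hinv hphi
    obtain ⟨h1, h2, h3, h4, h5, h6, h7⟩ := hinv
    have hlen : dist.keys.length ≤ (mx + 1).toNat * (my + 1).toNat + 1 :=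
      length_le_box h7 (fun v hv => (h2 v hv).imp id (fun hg =>
        ⟨hg.1.2.1, hg.1.2.2.1, hg.1.2.2.2.1, hg.1.2.2.2.2⟩))
    have hq : q = [] := by
      have : (q.length : Int) ≤ 0 := by
        simp only [phiA] at hphi; push_cast at hphi ⊢; omega
      cases q with
      | nil => rfl
      | cons a l => simp at this; omega
    subst hq
    simp only [dijLoop]
    exact ⟨fun v hv => hv, h5, fun v hv => (h6 v hv).resolve_right (by simp)⟩
  | succ fuel ih =>
    intro q dist last hinv hphi
    obtain ⟨h1, h2, h3, h4, h5, h6, h7⟩ := hinv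
    cases q with
    | nil =>
      simp only [dijLoop]
      exact ⟨fun v hv => hv, h5, fun v hv => (h6 v hv).resolve_right (by simp)⟩
    | cons e q =>
      simp only [dijLoop]
      set m := pqMin e q with hm
      have hm_mem : m ∈ e :: q := pqMin_mem e q
      have hlast_le : last ≤ m.1 := (h1 m hm_mem).1
      have hcur_keys : m.2 ∈ dist.keys := (h1 m hm_mem).2
      have hcur_reach : Reach blocks mx my m.2 := h5 _ hcur_keys
      set q' := (e :: q).erase m with hq'
      have hq1c : ∀ e' ∈ q', m.1 ≤ e'.1 ∧ e'.2 ∈ dist.keys := by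
        intro e' he'
        have he'' := List.mem_of_mem_erase he'
        exact ⟨pqMin_fst_le e q e' he'', (h1 e' he'').2⟩
      have hcopy2 : ∀ v ∈ dist.keys, v = ((0 : Int), (0 : Int)) ∨
          (Good blocks mx my v ∧ ∃ dv, dist.get? v = some dv ∧ dv ≤ m.1 + 1) := by
        intro v hv
        rcases h2 v hv with hv0 | ⟨hgv, dv, hdv, hle⟩
        · exact Or.inl hv0
        · exact Or.inr ⟨hgv, dv, hdv, by omega⟩
      have hpend : ∀ v ∈ dist.keys,
          ClosedIn blocks mx my dist.keys v ∨ v = m.2 ∨ ∃ e' ∈ q', e'.2 = v := by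
        intro v hv
        rcases h6 v hv with hcl | ⟨e', he', hev⟩
        · exact Or.inl hcl
        · by_cases hem : e' = m
          · subst hem; exact Or.inr (Or.inl hev.symm)
          · exact Or.inr (Or.inr ⟨e', (List.mem_erase_of_ne hem).2 he', hev⟩)
      have hmid0 : AMid blocks mx my m.1 m.2 (q', dist) :=
        ⟨hq1c, hcopy2, h3, by omega, h5, hpend, h7⟩
      have hreach_nb : ∀ nb, Adj m.2 nb → Good blocks mx my nb → Reach blocks mx my nb :=
        fun nb ha hg => Reach.step hcur_reach ha hg
      simp only [List.foldl_cons, List.foldl_nil]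
      set n1 : Int × Int := (m.2.1, m.2.2 + 1) with hn1
      set n2 : Int × Int := (m.2.1, m.2.2 - 1) with hn2
      set n3 : Int × Int := (m.2.1 + 1, m.2.2) with hn3
      set n4 : Int × Int := (m.2.1 - 1, m.2.2) with hn4
      have ha1 : Adj m.2 n1 := Or.inl rfl
      have ha2 : Adj m.2 n2 := Or.inr (Or.inl rfl)
      have ha3 : Adj m.2 n3 := Or.inr (Or.inr (Or.inl rfl))
      have ha4 : Adj m.2 n4 := Or.inr (Or.inr (Or.inr rfl))
      obtain ⟨hm1, hsub1, hg1, hp1⟩ :=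
        relax_step blocks mx my m.1 m.2 n1 (q', dist) hmid0 (hreach_nb _ ha1)
      set st1 := relax blocks 0 0 mx my m.1 (q', dist) n1
      obtain ⟨hm2, hsub2, hg2, hp2⟩ := relax_step blocks mx my m.1 m.2 n2 st1 hm1 (hreach_nb _ ha2)
      set st2 := relax blocks 0 0 mx my m.1 st1 n2
      obtain ⟨hm3, hsub3, hg3, hp3⟩ := relax_step blocks mx my m.1 m.2 n3 st2 hm2 (hreach_nb _ ha3)
      set st3 := relax blocks 0 0 mx my m.1 st2 n3
      obtain ⟨hm4, hsub4, hg4, hp4⟩ := relax_step blocks mx my m.1 m.2 n4 st3 hm3 (hreach_nb _ ha4)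
      set st4 := relax blocks 0 0 mx my m.1 st3 n4
      have hsub04 : ∀ v ∈ dist.keys, v ∈ st4.2.keys := by
        intro v hv; exact hsub4 _ (hsub3 _ (hsub2 _ (hsub1 _ hv)))
      have hcur_closed : ClosedIn blocks mx my st4.2.keys m.2 := by
        intro w haw hgw
        have haw' : w = n1 ∨ w = n2 ∨ w = n3 ∨ w = n4 := haw
        rcases haw' with hw | hw | hw | hw
        · rw [hw]; exact hsub4 _ (hsub3 _ (hsub2 _ (hg1 (hw ▸ hgw))))
        · rw [hw]; exact hsub4 _ (hsub3 _ (hg2 (hw ▸ hgw)))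
        · rw [hw]; exact hsub4 _ (hg3 (hw ▸ hgw))
        · rw [hw]; exact hg4 (hw ▸ hgw)
      obtain ⟨hr1, hr2, hr3, hr4, hr5, hr6, hr7⟩ := hm4
      have hinv4 : AInv blocks mx my st4.1 st4.2 m.1 := by
        refine ⟨hr1, hr2, hr3, hr4, hr5, ?_, hr7⟩
        intro v hv
        rcases hr6 v hv with hcl | hcv | hvt
        · exact Or.inl hcl
        · rw [hcv]; exact Or.inl hcur_closed
        · exact Or.inr hvt
      have hphi4 : phiA mx my st4.1 st4.2 ≤ fuel := by
        have hlen : q'.length = (e :: q).length - 1 := List.length_erase_of_mem hm_mem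
        have h0 : phiA mx my q' dist ≤ phiA mx my (e :: q) dist - 1 := by
          simp only [phiA, hlen, List.length_cons]
          push_cast [Nat.add_sub_cancel]
          omega
        have hchain : phiA mx my st4.1 st4.2 ≤ phiA mx my q' dist :=
          le_trans hp4 (le_trans hp3 (le_trans hp2 hp1))
        push_cast at hphi ⊢
        omega
      obtain ⟨hc1, hc2, hc3⟩ := ih st4.1 st4.2 m.1 hinv4 hphi4
      exact ⟨fun v hv => hc1 v (hsub04 v hv), hc2, hc3⟩

lemma dij_mem_iff (blocks : List (Int × Int)) (mx my : Int) (v : Int × Int) :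
    v ∈ (dijLoop blocks 0 0 mx my (2 * ((mx + 1).toNat * (my + 1).toNat) + 2)
        [((0 : Int), ((0 : Int), (0 : Int)))]
        ((PySem.Dict.empty).insert ((0 : Int), (0 : Int)) (0 : Int))).keys ↔
      Reach blocks mx my v := by
  have hkeys : ((PySem.Dict.empty).insert ((0 : Int), (0 : Int)) (0 : Int)).keys =
      [((0 : Int), (0 : Int))] := rfl
  have hget : ((PySem.Dict.empty).insert ((0 : Int), (0 : Int)) (0 : Int)).get?
      ((0 : Int), (0 : Int)) = some 0 := PySem.Dict.get?_insert_self _ _ _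
  have hinv : AInv blocks mx my [((0 : Int), ((0 : Int), (0 : Int)))]
      ((PySem.Dict.empty).insert ((0 : Int), (0 : Int)) (0 : Int)) (-1) := by
    refine ⟨?_, ?_, hget, le_refl _, ?_, ?_, ?_⟩
    · intro e he
      rw [List.mem_singleton.1 he, hkeys]
      exact ⟨by norm_num, by simp⟩
    · intro w hw
      rw [hkeys] at hw
      exact Or.inl (List.mem_singleton.1 hw)
    · intro w hw
      rw [hkeys] at hw
      rw [List.mem_singleton.1 hw]
      exact Reach.start
    · intro w hw
      rw [hkeys] at hw
      exact Or.inr ⟨((0 : Int), ((0 : Int), (0 : Int))), by simp, (List.mem_singleton.1 hw).symm⟩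
    · rw [hkeys]; exact List.nodup_singleton _
  have hphi : phiA mx my [((0 : Int), ((0 : Int), (0 : Int)))]
      ((PySem.Dict.empty).insert ((0 : Int), (0 : Int)) (0 : Int)) ≤
      (2 * ((mx + 1).toNat * (my + 1).toNat) + 2 : Nat) := by
    simp only [phiA, hkeys, List.length_singleton]
    push_cast; omega
  obtain ⟨hsub, hsound, hclosed⟩ := dij_run blocks mx my _ _ _ _ hinv hphi
  constructor
  · exact fun hv => hsound v hv
  · intro hr
    induction hr with
    | start => exact hsub _ (by rw [hkeys]; simp)
    | step hu hadj hgood ih => exact hclosed _ ih _ hadj hgood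

lemma dijkstra_none_iff (blocks : List (Int × Int)) (mx my : Int) :
    dijkstra (0, 0) (mx, my) blocks = none ↔ ¬ Reach blocks mx my (mx, my) := by
  unfold dijkstra
  simp only [sub_zero]
  rw [PySem.Dict.get?_eq_none_iff_not_mem_keys]
  rw [dij_mem_iff]

-- ===== B-side invariant =====

def BInv (blocked : List (Int × Int)) (mx my : Int)
    (seen : List (Int × Int)) (todo : List (Int × Int)) : Prop :=
  (∀ v ∈ todo, v ∈ seen) ∧
  (∀ v ∈ seen, Reach blocked mx my v) ∧
  (∀ v ∈ seen, v = ((0 : Int), (0 : Int)) ∨ (0 ≤ v.1 ∧ v.1 ≤ mx ∧ 0 ≤ v.2 ∧ v.2 ≤ my)) ∧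
  seen.Nodup ∧
  (∀ v ∈ seen, ClosedIn blocked mx my seen v ∨ v ∈ todo)

def phiB (mx my : Int) (seen todo : List (Int × Int)) : Int :=
  2 * ((mx + 1).toNat * (my + 1).toNat + 1) + todo.length - 2 * seen.length

-- mid-iteration invariant: the popped cell may still be half-expanded
def BMid (blocked : List (Int × Int)) (mx my : Int) (cur : Int × Int)
    (st : List (Int × Int) × List (Int × Int)) : Prop :=
  (∀ v ∈ st.2, v ∈ st.1) ∧
  (∀ v ∈ st.1, Reach blocked mx my v) ∧
  (∀ v ∈ st.1, v = ((0 : Int), (0 : Int)) ∨ (0 ≤ v.1 ∧ v.1 ≤ mx ∧ 0 ≤ v.2 ∧ v.2 ≤ my)) ∧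
  st.1.Nodup ∧
  (∀ v ∈ st.1, ClosedIn blocked mx my st.1 v ∨ v = cur ∨ v ∈ st.2)

lemma bfsVisit_step (blocked : List (Int × Int)) (mx my : Int) (cur nb : Int × Int)
    (st : List (Int × Int) × List (Int × Int)) (hmid : BMid blocked mx my cur st)
    (hre : Good blocked mx my nb → Reach blocked mx my nb) :
    BMid blocked mx my cur (bfsVisit blocked mx my st nb) ∧
    (∀ v ∈ st.1, v ∈ (bfsVisit blocked mx my st nb).1) ∧
    (Good blocked mx my nb → nb ∈ (bfsVisit blocked mx my st nb).1) ∧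
    phiB mx my (bfsVisit blocked mx my st nb).1 (bfsVisit blocked mx my st nb).2 ≤
      phiB mx my st.1 st.2 := by
  obtain ⟨h1, h2, h3, h4, h5⟩ := hmid
  unfold bfsVisit
  split
  · rename_i hc
    obtain ⟨hns, hnb, hb1, hb2, hb3, hb4⟩ := hc
    rw [PySem.Set.add_of_not_mem hns]
    refine ⟨⟨?_, ?_, ?_, ?_, ?_⟩, ?_, ?_, ?_⟩
    · intro v hv
      rcases List.mem_append.1 hv with hv | hv
      · exact List.mem_append_left _ (h1 v hv)
      · exact List.mem_append_right _ hv
    · intro v hv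
      rcases List.mem_append.1 hv with hv | hv
      · exact h2 v hv
      · rw [List.mem_singleton.1 hv]
        exact hre ⟨hnb, hb1, hb2, hb3, hb4⟩
    · intro v hv
      rcases List.mem_append.1 hv with hv | hv
      · exact h3 v hv
      · rw [List.mem_singleton.1 hv]; right; exact ⟨hb1, hb2, hb3, hb4⟩
    · refine List.Nodup.append h4 (List.nodup_singleton _) ?_
      intro x hx hy
      rw [List.mem_singleton] at hy
      exact hns (hy ▸ hx)
    · intro v hv
      rcases List.mem_append.1 hv with hv | hv
      · rcases h5 v hv with hcl | hcv | hvt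
        · left; intro w haw hgw; exact List.mem_append_left _ (hcl w haw hgw)
        · right; left; exact hcv
        · right; right; exact List.mem_append_left _ hvt
      · right; right; rw [List.mem_singleton.1 hv]; exact List.mem_append_right _ (by simp)
    · intro v hv; exact List.mem_append_left _ hv
    · intro _; exact List.mem_append_right _ (by simp)
    · simp only [phiB, List.length_append, List.length_singleton]
      push_cast; omega
  · rename_i hc
    refine ⟨⟨h1, h2, h3, h4, h5⟩, fun v hv => hv, ?_, le_refl _⟩
    intro hg
    by_contra hns
    exact hc ⟨hns, hg.1, hg.2.1, hg.2.2.1, hg.2.2.2.1, hg.2.2.2.2⟩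

lemma bfs_run (blocked : List (Int × Int)) (mx my : Int) :
    ∀ (fuel : Nat) (seen todo : List (Int × Int)),
      BInv blocked mx my seen todo → phiB mx my seen todo ≤ fuel →
      (∀ v ∈ seen, v ∈ bfsLoop blocked mx my fuel seen todo) ∧
      (∀ v ∈ bfsLoop blocked mx my fuel seen todo, Reach blocked mx my v) ∧
      (∀ v ∈ bfsLoop blocked mx my fuel seen todo,
        ClosedIn blocked mx my (bfsLoop blocked mx my fuel seen todo) v) := by
  intro fuel
  induction fuel with
  | zero =>
    intro seen todo hinv hphi
    obtain ⟨h1, h2, h3, h4, h5⟩ := hinv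
    have hlen : seen.length ≤ (mx + 1).toNat * (my + 1).toNat + 1 := length_le_box h4 h3
    have htodo : todo = [] := by
      have : (todo.length : Int) ≤ 0 := by
        simp only [phiB] at hphi; push_cast at hphi ⊢; omega
      cases todo with
      | nil => rfl
      | cons a l => simp at this; omega
    subst htodo
    simp only [bfsLoop]
    exact ⟨fun v hv => hv, h2, fun v hv => (h5 v hv).resolve_right (by simp)⟩
  | succ fuel ih =>
    intro seen todo hinv hphi
    obtain ⟨h1, h2, h3, h4, h5⟩ := hinv
    cases todo with
    | nil =>
      simp only [bfsLoop]
      exact ⟨fun v hv => hv, h2, fun v hv => (h5 v hv).resolve_right (by simp)⟩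
    | cons t ts =>
      simp only [bfsLoop]
      set cur := (t :: ts).getLast (by simp) with hcur
      have hcur_mem : cur ∈ t :: ts := List.getLast_mem _
      have hcur_seen : cur ∈ seen := h1 _ hcur_mem
      have hcur_reach : Reach blocked mx my cur := h2 _ hcur_seen
      set todo' := (t :: ts).dropLast with htodo'
      have hsplit : todo' ++ [cur] = t :: ts := List.dropLast_append_getLast (by simp)
      have hmid0 : BMid blocked mx my cur (seen, todo') := by
        refine ⟨fun v hv => h1 v (by rw [← hsplit]; exact List.mem_append_left _ hv),
          h2, h3, h4, ?_⟩
        intro v hv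
        rcases h5 v hv with hcl | hvt
        · exact Or.inl hcl
        · rw [← hsplit] at hvt
          rcases List.mem_append.1 hvt with hvt | hvt
          · exact Or.inr (Or.inr hvt)
          · exact Or.inr (Or.inl (List.mem_singleton.1 hvt))
      have hreach_nb : ∀ nb, Adj cur nb → Good blocked mx my nb → Reach blocked mx my nb :=
        fun nb ha hg => Reach.step hcur_reach ha hg
      -- the four neighbour visits
      simp only [List.foldl_cons, List.foldl_nil]
      set n1 : Int × Int := (cur.1, cur.2 + 1) with hn1
      set n2 : Int × Int := (cur.1, cur.2 - 1) with hn2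
      set n3 : Int × Int := (cur.1 + 1, cur.2) with hn3
      set n4 : Int × Int := (cur.1 - 1, cur.2) with hn4
      have ha1 : Adj cur n1 := Or.inl rfl
      have ha2 : Adj cur n2 := Or.inr (Or.inl rfl)
      have ha3 : Adj cur n3 := Or.inr (Or.inr (Or.inl rfl))
      have ha4 : Adj cur n4 := Or.inr (Or.inr (Or.inr rfl))
      obtain ⟨hm1, hsub1, hg1, hp1⟩ :=
        bfsVisit_step blocked mx my cur n1 (seen, todo') hmid0 (hreach_nb _ ha1)
      set st1 := bfsVisit blocked mx my (seen, todo') n1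
      obtain ⟨hm2, hsub2, hg2, hp2⟩ := bfsVisit_step blocked mx my cur n2 st1 hm1 (hreach_nb _ ha2)
      set st2 := bfsVisit blocked mx my st1 n2
      obtain ⟨hm3, hsub3, hg3, hp3⟩ := bfsVisit_step blocked mx my cur n3 st2 hm2 (hreach_nb _ ha3)
      set st3 := bfsVisit blocked mx my st2 n3
      obtain ⟨hm4, hsub4, hg4, hp4⟩ := bfsVisit_step blocked mx my cur n4 st3 hm3 (hreach_nb _ ha4)
      set st4 := bfsVisit blocked mx my st3 n4
      have hsub04 : ∀ v ∈ seen, v ∈ st4.1 := by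
        intro v hv; exact hsub4 _ (hsub3 _ (hsub2 _ (hsub1 _ hv)))
      -- cur is now fully expanded
      have hcur_closed : ClosedIn blocked mx my st4.1 cur := by
        intro w haw hgw
        have haw' : w = n1 ∨ w = n2 ∨ w = n3 ∨ w = n4 := haw
        rcases haw' with hw | hw | hw | hw
        · rw [hw]; exact hsub4 _ (hsub3 _ (hsub2 _ (hg1 (hw ▸ hgw))))
        · rw [hw]; exact hsub4 _ (hsub3 _ (hg2 (hw ▸ hgw)))
        · rw [hw]; exact hsub4 _ (hg3 (hw ▸ hgw))
        · rw [hw]; exact hg4 (hw ▸ hgw)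
      obtain ⟨hq1, hq2, hq3, hq4, hq5⟩ := hm4
      have hinv4 : BInv blocked mx my st4.1 st4.2 := by
        refine ⟨hq1, hq2, hq3, hq4, ?_⟩
        intro v hv
        rcases hq5 v hv with hcl | hcv | hvt
        · exact Or.inl hcl
        · rw [hcv]; exact Or.inl hcur_closed
        · exact Or.inr hvt
      have hphi4 : phiB mx my st4.1 st4.2 ≤ fuel := by
        have hdrop : (todo'.length : Int) = (t :: ts).length - 1 := by
          rw [htodo', List.length_dropLast]
          simp only [List.length_cons, Nat.add_sub_cancel]
          push_cast; ring
        have h0 : phiB mx my seen todo' ≤ phiB mx my seen (t :: ts) - 1 := by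
          simp only [phiB]; omega
        have hchain : phiB mx my st4.1 st4.2 ≤ phiB mx my seen todo' :=
          le_trans hp4 (le_trans hp3 (le_trans hp2 hp1))
        push_cast at hphi ⊢
        omega
      obtain ⟨hc1, hc2, hc3⟩ := ih st4.1 st4.2 hinv4 hphi4
      exact ⟨fun v hv => hc1 v (hsub04 v hv), hc2, hc3⟩

lemma bfs_mem_iff (blocked : List (Int × Int)) (mx my : Int) (v : Int × Int) :
    v ∈ bfsLoop blocked mx my (2 * ((mx + 1).toNat * (my + 1).toNat) + 2)
        [((0 : Int), (0 : Int))] [((0 : Int), (0 : Int))] ↔ Reach blocked mx my v := by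
  have hinv : BInv blocked mx my [((0 : Int), (0 : Int))] [((0 : Int), (0 : Int))] := by
    refine ⟨fun v hv => hv, ?_, ?_, List.nodup_singleton _, ?_⟩
    · intro v hv; rw [List.mem_singleton.1 hv]; exact Reach.start
    · intro v hv; exact Or.inl (List.mem_singleton.1 hv)
    · intro v hv; exact Or.inr hv
  have hphi : phiB mx my [((0 : Int), (0 : Int))] [((0 : Int), (0 : Int))] ≤
      (2 * ((mx + 1).toNat * (my + 1).toNat) + 2 : Nat) := by
    simp only [phiB, List.length_singleton]; push_cast; omega
  obtain ⟨hsub, hsound, hclosed⟩ := bfs_run blocked mx my _ _ _ hinv hphi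
  constructor
  · exact fun hv => hsound v hv
  · intro hr
    induction hr with
    | start => exact hsub _ (by simp)
    | step hu hadj hgood ih => exact hclosed _ ih _ hadj hgood

lemma connectedB_iff (pairs : List (Int × Int)) (k : Nat) (mx my : Int) :
    connectedB pairs (k : Int) mx my = true ↔ Reach (pairs.take k) mx my (mx, my) := by
  unfold connectedB
  rw [PySem.List.slice_to_natCast]
  simp only [decide_eq_true_eq]
  have hof : PySem.Set.ofList [((0 : Int), (0 : Int))] = [((0 : Int), (0 : Int))] :=
    PySem.Set.ofList_eq_self_of_nodup _ (List.nodup_singleton _)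
  rw [hof, bfs_mem_iff]
  exact Reach_congr (fun z => PySem.Set.mem_ofList _ _)

-- monotonicity: more blocks never connect
lemma connectedB_mono (pairs : List (Int × Int)) (mx my : Int) {j k : Nat} (hjk : j ≤ k)
    (hk : connectedB pairs (k : Int) mx my = true) : connectedB pairs (j : Int) mx my = true := by
  rw [connectedB_iff] at *
  exact Reach_anti (fun z hz => (List.take_subset_take_left pairs hjk) hz) hk

-- ===== linear scan (A) characterised by the first bad prefix =====

lemma take_succ_concat (pairs : List (Int × Int)) (i : Nat) (h : i < pairs.length) :
    pairs.take (i + 1) = pairs.take i ++ [pairs[i]] := by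
  rw [List.take_add_one, List.getElem?_eq_getElem h]
  rfl

lemma linearA_none (pairs : List (Int × Int)) (mx my : Int) :
    ∀ j i, pairs.length - i = j →
      (∀ k, i < k → k ≤ pairs.length → connectedB pairs (k : Int) mx my = true) →
      part2Go mx my (PySem.Set.ofList (pairs.take i)) (pairs.drop i) = none := by
  intro j
  induction j with
  | zero =>
    intro i hij _
    have : pairs.drop i = [] := List.drop_eq_nil_of_le (by omega)
    rw [this]
    rfl
  | succ j ihj =>
    intro i hij hconn
    have hilt : i < pairs.length := by omega
    rw [List.drop_eq_getElem_cons hilt]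
    show (if dijkstra (0, 0) (mx, my)
        (PySem.Set.add (PySem.Set.ofList (pairs.take i)) pairs[i]) = none then some pairs[i]
      else part2Go mx my (PySem.Set.add (PySem.Set.ofList (pairs.take i)) pairs[i])
        (pairs.drop (i + 1))) = none
    have hset : PySem.Set.add (PySem.Set.ofList (pairs.take i)) pairs[i] =
        PySem.Set.ofList (pairs.take (i + 1)) := by
      rw [take_succ_concat pairs i hilt, PySem.Set.ofList_append_singleton]
    have hcon : connectedB pairs ((i + 1 : Nat) : Int) mx my = true :=
      hconn (i + 1) (by omega) (by omega)
    have hreach : Reach (pairs.take (i + 1)) mx my (mx, my) := (connectedB_iff _ _ _ _).1 hcon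
    have hnot : ¬ dijkstra (0, 0) (mx, my)
        (PySem.Set.add (PySem.Set.ofList (pairs.take i)) pairs[i]) = none := by
      rw [hset, dijkstra_none_iff]
      intro hc
      exact hc ((Reach_congr (fun z => PySem.Set.mem_ofList _ _)).2 hreach)
    rw [if_neg hnot, hset]
    exact ihj (i + 1) (by omega) (fun k hk1 hk2 => hconn k (by omega) hk2)

lemma linearA_some (pairs : List (Int × Int)) (mx my : Int) (k₀ : Nat)
    (hk₀n : k₀ ≤ pairs.length) (hbad : connectedB pairs (k₀ : Int) mx my = false)
    (hleast : ∀ k, 1 ≤ k → k < k₀ → connectedB pairs (k : Int) mx my = true) :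
    ∀ j i, k₀ - i = j → i < k₀ →
      part2Go mx my (PySem.Set.ofList (pairs.take i)) (pairs.drop i) =
        PySem.List.pyGet? pairs ((k₀ : Int) - 1) := by
  intro j
  induction j with
  | zero => intro i hij hik; omega
  | succ j ihj =>
    intro i hij hik
    have hilt : i < pairs.length := by omega
    rw [List.drop_eq_getElem_cons hilt]
    show (if dijkstra (0, 0) (mx, my)
        (PySem.Set.add (PySem.Set.ofList (pairs.take i)) pairs[i]) = none then some pairs[i]
      else part2Go mx my (PySem.Set.add (PySem.Set.ofList (pairs.take i)) pairs[i])
        (pairs.drop (i + 1))) = PySem.List.pyGet? pairs ((k₀ : Int) - 1)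
    have hset : PySem.Set.add (PySem.Set.ofList (pairs.take i)) pairs[i] =
        PySem.Set.ofList (pairs.take (i + 1)) := by
      rw [take_succ_concat pairs i hilt, PySem.Set.ofList_append_singleton]
    by_cases hstop : i + 1 = k₀
    · -- this is the first disconnecting block
      have hreach : ¬ Reach (pairs.take (i + 1)) mx my (mx, my) := by
        intro hc
        have := (connectedB_iff pairs (i + 1) mx my).2 hc
        rw [hstop] at this
        rw [this] at hbad
        exact Bool.noConfusion hbad
      have hyes : dijkstra (0, 0) (mx, my)
          (PySem.Set.add (PySem.Set.ofList (pairs.take i)) pairs[i]) = none := by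
        rw [hset, dijkstra_none_iff]
        intro hc
        exact hreach ((Reach_congr (fun z => PySem.Set.mem_ofList _ _)).1 hc)
      rw [if_pos hyes]
      have hcast : (k₀ : Int) - 1 = ((i : Nat) : Int) := by omega
      rw [hcast, PySem.List.pyGet?_natCast, List.getElem?_eq_getElem hilt]
    · -- still connected, move on
      have hcon : connectedB pairs ((i + 1 : Nat) : Int) mx my = true :=
        hleast (i + 1) (by omega) (by omega)
      have hreach : Reach (pairs.take (i + 1)) mx my (mx, my) := (connectedB_iff _ _ _ _).1 hcon
      have hnot : ¬ dijkstra (0, 0) (mx, my)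
          (PySem.Set.add (PySem.Set.ofList (pairs.take i)) pairs[i]) = none := by
        rw [hset, dijkstra_none_iff]
        intro hc
        exact hc ((Reach_congr (fun z => PySem.Set.mem_ofList _ _)).2 hreach)
      rw [if_neg hnot, hset]
      exact ihj (i + 1) (by omega) (by omega)

-- ===== binary search (B) finds the same first bad prefix =====

lemma bsLoop_char (pairs : List (Int × Int)) (mx my : Int) (k₀ : Nat)
    (_hk₀1 : 1 ≤ k₀) (_hk₀n : k₀ ≤ pairs.length)
    (hbad : connectedB pairs (k₀ : Int) mx my = false)
    (hleast : ∀ k, 1 ≤ k → k < k₀ → connectedB pairs (k : Int) mx my = true) :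
    ∀ (fuel : Nat) (lo hi : Int), 0 ≤ lo → lo < (k₀ : Int) → (k₀ : Int) ≤ hi →
      hi ≤ pairs.length → hi - lo ≤ fuel →
      bsLoop pairs mx my fuel lo hi = PySem.List.pyGet? pairs ((k₀ : Int) - 1) := by
  intro fuel
  induction fuel with
  | zero => intro lo hi h0 h1 h2 h3 h4; omega
  | succ fuel ih =>
    intro lo hi h0 h1 h2 h3 h4
    show (if hi - lo > 1 then
        if connectedB pairs (PySem.Int.floordiv (lo + hi) 2) mx my then
          bsLoop pairs mx my fuel (PySem.Int.floordiv (lo + hi) 2) hi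
        else bsLoop pairs mx my fuel lo (PySem.Int.floordiv (lo + hi) 2)
      else PySem.List.pyGet? pairs (hi - 1)) = PySem.List.pyGet? pairs ((k₀ : Int) - 1)
    by_cases hgap : hi - lo > 1
    · rw [if_pos hgap]
      set mid := PySem.Int.floordiv (lo + hi) 2 with hmid
      have hmlo : lo + 1 ≤ mid := by
        rw [hmid]
        rw [PySem.Int.le_floordiv_iff_mul_le (by norm_num)]
        omega
      have hmhi : mid ≤ hi - 1 := by
        have : mid < hi := by
          rw [hmid]
          rw [PySem.Int.floordiv_lt_iff_lt_mul (by norm_num)]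
          omega
        omega
      have hmid0 : 0 ≤ mid := by omega
      have hmidcast : mid = ((mid.toNat : Nat) : Int) := by omega
      by_cases hc : connectedB pairs mid mx my = true
      · rw [if_pos hc]
        have hmk : mid < (k₀ : Int) := by
          by_contra hge
          rw [hmidcast] at hc
          have := connectedB_mono pairs mx my (j := k₀) (k := mid.toNat) (by omega) hc
          rw [this] at hbad
          exact Bool.noConfusion hbad
        exact ih mid hi (by omega) hmk h2 h3 (by omega)
      · rw [if_neg hc]
        have hmk : (k₀ : Int) ≤ mid := by
          by_contra hlt
          have h1m : 1 ≤ mid.toNat := by omega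
          have := hleast mid.toNat h1m (by omega)
          rw [← hmidcast] at this
          exact hc this
        exact ih lo mid h0 h1 hmk (by omega) (by omega)
    · rw [if_neg hgap]
      have : hi = (k₀ : Int) := by omega
      rw [this]

-- ===== VERDICT (by name: the statement is the Claim_ definition above) =====
theorem part2_spec : Claim_equal_part2 := by
  intro pairs mx my _
  unfold Spec_part2
  have hA0 : part2 pairs mx my =
      part2Go mx my (PySem.Set.ofList (pairs.take 0)) (pairs.drop 0) := rfl
  by_cases hex : ∃ k, 1 ≤ k ∧ k ≤ pairs.length ∧ connectedB pairs (k : Int) mx my = false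
  · classical
    set k₀ := Nat.find hex with hk₀
    obtain ⟨hk1, hkn, hbad⟩ := Nat.find_spec hex
    have hleast : ∀ k, 1 ≤ k → k < k₀ → connectedB pairs (k : Int) mx my = true := by
      intro k hka hkb
      by_contra hf
      exact Nat.find_min hex hkb ⟨hka, by omega, by
        cases h : connectedB pairs (k : Int) mx my
        · rfl
        · exact absurd h hf⟩
    have hAval : part2 pairs mx my = PySem.List.pyGet? pairs ((k₀ : Int) - 1) := by
      rw [hA0]
      exact linearA_some pairs mx my k₀ hkn hbad hleast k₀ 0 (by omega) (by omega)
    have hnz : pairs.length ≠ 0 := by omega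
    have hcn : connectedB pairs ((pairs.length : Nat) : Int) mx my = false := by
      cases h : connectedB pairs ((pairs.length : Nat) : Int) mx my
      · rfl
      · have := connectedB_mono pairs mx my hkn h
        rw [this] at hbad
        exact Bool.noConfusion hbad
    have hBval : part2_alt pairs mx my = PySem.List.pyGet? pairs ((k₀ : Int) - 1) := by
      unfold part2_alt
      rw [if_neg]
      · exact bsLoop_char pairs mx my k₀ hk1 hkn hbad hleast (pairs.length + 1) 0
          (pairs.length : Int) (le_refl _) (by omega) (by omega) (le_refl _) (by push_cast; omega)
      · rintro (h0 | hct)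
        · exact hnz (by exact_mod_cast h0)
        · rw [hcn] at hct; exact Bool.noConfusion hct
    rw [hAval, hBval]
  · have hall : ∀ k, 1 ≤ k → k ≤ pairs.length → connectedB pairs (k : Int) mx my = true := by
      intro k hka hkb
      by_contra hf
      exact hex ⟨k, hka, hkb, by
        cases h : connectedB pairs (k : Int) mx my
        · rfl
        · exact absurd h hf⟩
    have hAval : part2 pairs mx my = none := by
      rw [hA0]
      exact linearA_none pairs mx my (pairs.length) 0 (by omega)
        (fun k hk1 hk2 => hall k (by omega) hk2)
    have hBval : part2_alt pairs mx my = none := by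
      unfold part2_alt
      by_cases hn : pairs.length = 0
      · rw [if_pos]
        left
        exact_mod_cast hn
      · rw [if_pos]
        right
        exact hall pairs.length (by omega) (le_refl _)
    rw [hAval, hBval]
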